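-- pv_equiv track=rewrite | github.com/1c99/continual-medseg-distill | scripts/package_results.py | _pick_metric_key
-- ===== SOURCE A (Python) =====
-- from typing import Any
--
-- def _pick_metric_key(metrics: dict[str, Any], candidates: list[str], contains_token: str) -> str | None:
--     keys = list(metrics.keys())
--     for c in candidates:
--         if c in metrics:
--             return c
--     for k in keys:
--         lk = k.lower()
--         if contains_token in lk and "mean" in lk:
--             return k
--     for k in keys:
--         lk = k.lower()
--         if contains_token in lk:
--             return k
--     return None
-- ===== SOURCE B (Python) =====
-- def _pick_metric_key(metrics, candidates, contains_token):
--     hit = next((c for c in candidates if c in metrics), None)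
--     if hit is not None:
--         return hit
--     first_mean = None
--     first_token = None
--     for k in metrics.keys():
--         lk = k.lower()
--         if contains_token in lk:
--             if first_token is None:
--                 first_token = k
--             if first_mean is None and "mean" in lk:
--                 first_mean = k
--     return first_mean if first_mean is not None else first_token
-- ===== Notes on version B (the rewrite author's own statement) =====
-- stated objective: alternative
-- what changed: The two separate key scans (token+mean first, then token alone) are fused into one single pass that maintains two first-match accumulators, and the candidates loop becomes a next()-first-match; same O(n*m) cost but one traversal of the keys instead of two.
import Mathlib
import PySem

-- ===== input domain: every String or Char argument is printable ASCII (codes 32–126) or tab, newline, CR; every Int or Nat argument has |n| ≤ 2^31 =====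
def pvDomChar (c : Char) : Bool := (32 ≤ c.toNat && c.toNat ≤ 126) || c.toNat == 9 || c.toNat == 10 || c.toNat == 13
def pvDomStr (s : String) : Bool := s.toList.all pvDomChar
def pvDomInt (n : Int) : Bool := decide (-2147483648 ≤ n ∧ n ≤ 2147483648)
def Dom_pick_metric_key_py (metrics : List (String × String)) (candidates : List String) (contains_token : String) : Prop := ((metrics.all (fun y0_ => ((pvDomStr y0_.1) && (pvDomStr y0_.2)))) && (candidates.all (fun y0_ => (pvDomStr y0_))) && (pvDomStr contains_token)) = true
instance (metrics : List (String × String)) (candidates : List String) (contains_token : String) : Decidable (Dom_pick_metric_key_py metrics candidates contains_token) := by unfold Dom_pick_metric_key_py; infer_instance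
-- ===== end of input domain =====

-- One honest line: B fuses A's two separate key scans into a single pass carrying two
-- first-match accumulators (objective: alternative decomposition, same cost class).

-- ===== PORT A =====
-- for c in candidates: if c in metrics: return c
def pvA_candLoop (keys : List String) : List String → Option String
  | [] => none
  | c :: cs => if keys.contains c then some c else pvA_candLoop keys cs

-- for k in keys: if contains_token in k.lower() and "mean" in k.lower(): return k
def pvA_meanLoop (tok : String) : List String → Option String
  | [] => none
  | k :: ks =>
    let lk := PySem.Str.lower k
    if PySem.Str.isIn tok lk && PySem.Str.isIn "mean" lk then some k else pvA_meanLoop tok ks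

-- for k in keys: if contains_token in k.lower(): return k
def pvA_tokLoop (tok : String) : List String → Option String
  | [] => none
  | k :: ks =>
    let lk := PySem.Str.lower k
    if PySem.Str.isIn tok lk then some k else pvA_tokLoop tok ks

def pick_metric_key_py (metrics : List (String × String)) (candidates : List String) (contains_token : String) : Option String :=
  let keys := PySem.Set.ofList (metrics.map Prod.fst)   -- list(metrics.keys())
  match pvA_candLoop keys candidates with
  | some c => some c
  | none =>
    match pvA_meanLoop contains_token keys with
    | some k => some k
    | none => pvA_tokLoop contains_token keys

-- ===== PORT B =====
-- one pass over metrics.keys() keeping (first_mean, first_token); returns first_mean or first_token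
def pvB_scan (tok : String) : List String → Option String → Option String → Option String
  | [], fm, ft => if fm.isSome then fm else ft
  | k :: ks, fm, ft =>
    let lk := PySem.Str.lower k
    if PySem.Str.isIn tok lk then
      let ft' := if ft.isNone then some k else ft
      let fm' := if fm.isNone && PySem.Str.isIn "mean" lk then some k else fm
      pvB_scan tok ks fm' ft'
    else pvB_scan tok ks fm ft

def pick_metric_key_py_alt (metrics : List (String × String)) (candidates : List String) (contains_token : String) : Option String :=
  let keys := PySem.Set.ofList (metrics.map Prod.fst)
  match candidates.find? (fun c => keys.contains c) with   -- next((c for c in candidates if c in metrics), None)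
  | some c => some c
  | none => pvB_scan contains_token keys none none

-- ===== PRECONDITION & SPEC =====
def Spec_pick_metric_key_py (metrics : List (String × String)) (candidates : List String) (contains_token : String) (out : Option String) : Prop := out = pick_metric_key_py_alt metrics candidates contains_token
instance (metrics : List (String × String)) (candidates : List String) (contains_token : String) (out : Option String) : Decidable (Spec_pick_metric_key_py metrics candidates contains_token out) := by unfold Spec_pick_metric_key_py; infer_instance

-- ===== CLAIM (what is proved, stated in full; the proofs are below) =====
def Claim_equal_pick_metric_key_py : Prop := ∀ (metrics : List (String × String)) (candidates : List String) (contains_token : String), Dom_pick_metric_key_py metrics candidates contains_token → Spec_pick_metric_key_py metrics candidates contains_token (pick_metric_key_py metrics candidates contains_token)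

-- ===== LEMMAS AND PROOFS =====
theorem pvA_candLoop_eq_find? (keys : List String) (cs : List String) :
    pvA_candLoop keys cs = cs.find? (fun c => keys.contains c) := by
  induction cs with
  | nil => rfl
  | cons c cs ih =>
    by_cases h : c ∈ keys <;> simp [pvA_candLoop, h, ih]

theorem pvB_scan_eq (tok : String) (ks : List String) (fm ft : Option String) :
    pvB_scan tok ks fm ft =
      match fm.or (pvA_meanLoop tok ks) with
      | some x => some x
      | none => ft.or (pvA_tokLoop tok ks) := by
  induction ks generalizing fm ft with
  | nil =>
    cases fm <;> cases ft <;> simp [pvB_scan, pvA_meanLoop, pvA_tokLoop, Option.or]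
  | cons k ks ih =>
    by_cases htok : PySem.Chars.isIn tok.toList (PySem.Chars.lower k.toList) = true <;>
      by_cases hm : PySem.Chars.isIn ['m', 'e', 'a', 'n'] (PySem.Chars.lower k.toList) = true <;>
      cases fm <;> cases ft <;>
      simp [pvB_scan, pvA_meanLoop, pvA_tokLoop, htok, hm, ih, Option.or]

theorem pick_metric_key_py_eq_alt (metrics : List (String × String)) (candidates : List String) (contains_token : String) :
    pick_metric_key_py metrics candidates contains_token = pick_metric_key_py_alt metrics candidates contains_token := by
  simp only [pick_metric_key_py, pick_metric_key_py_alt, pvA_candLoop_eq_find?, pvB_scan_eq,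
    Option.or]
  rfl

-- ===== VERDICT (by name: the statement is the Claim_ definition above) =====
theorem pick_metric_key_py_spec : Claim_equal_pick_metric_key_py := by
  intro metrics candidates contains_token _
  exact pick_metric_key_py_eq_alt metrics candidates contains_token
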